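-- pv_equiv track=rewrite | github.com/thanhtuyen1712889/duplicate-checker-team-ready | duplicate_checker/service.py | common_tokens_in_order
-- ===== SOURCE A (Python) =====
-- def common_tokens_in_order(token_lists: list[list[str]]) -> list[str]:
--     if not token_lists:
--         return []
--     first = token_lists[0]
--     commons = set(first)
--     for tokens in token_lists[1:]:
--         commons &= set(tokens)
--     return [token for token in first if token in commons]
-- ===== SOURCE B (Python) =====
-- def common_tokens_in_order(token_lists: list[list[str]]) -> list[str]:
--     if not token_lists:
--         return []
--     return [t for t in token_lists[0] if all(t in other for other in token_lists[1:])]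
-- ===== Notes on version B (the rewrite author's own statement) =====
-- stated objective: simpler
-- what changed: Replaced the two-phase build-a-cumulative-intersection-set-then-filter with a single ordered pass over the first list that keeps a token iff a nested scan finds it in every remaining list; no set is ever built.
import Mathlib
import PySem

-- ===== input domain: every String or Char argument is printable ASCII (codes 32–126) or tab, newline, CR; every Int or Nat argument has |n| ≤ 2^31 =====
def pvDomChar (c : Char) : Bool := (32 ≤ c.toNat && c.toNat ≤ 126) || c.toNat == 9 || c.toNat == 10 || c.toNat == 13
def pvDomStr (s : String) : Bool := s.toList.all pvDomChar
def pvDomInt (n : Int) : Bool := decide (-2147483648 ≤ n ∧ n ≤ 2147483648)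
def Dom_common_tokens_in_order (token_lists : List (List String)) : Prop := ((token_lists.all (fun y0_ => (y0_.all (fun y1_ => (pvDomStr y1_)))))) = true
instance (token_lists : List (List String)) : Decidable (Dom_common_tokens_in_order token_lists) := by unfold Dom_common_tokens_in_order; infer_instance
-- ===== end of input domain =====

-- B replaces A's cumulative-intersection set with one ordered pass over the first list using a nested membership scan over the remaining lists (objective: simpler; not faster).


-- ===== PORT A =====
-- literal port of A: empty check, cumulative set intersection over the tail, then filter first by membership
def common_tokens_in_order (token_lists : List (List String)) : List String :=
  match token_lists with
  | [] => []
  | first :: rest =>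
    let commons : PySem.Set String :=
      rest.foldl (fun commons tokens => PySem.Set.inter commons (PySem.Set.ofList tokens))
        (PySem.Set.ofList first)
    first.filter (fun token => PySem.Set.contains commons token)

-- ===== PORT B =====
-- port of B: one pass over the first list, nested membership scan over the remaining lists
def common_tokens_in_order_alt (token_lists : List (List String)) : List String :=
  match token_lists with
  | [] => []
  | first :: rest =>
    first.filter (fun t => rest.all (fun other => other.contains t))

-- ===== PRECONDITION & SPEC =====
def Spec_common_tokens_in_order (token_lists : List (List String)) (out : List String) : Prop := out = common_tokens_in_order_alt token_lists
instance (token_lists : List (List String)) (out : List String) : Decidable (Spec_common_tokens_in_order token_lists out) := by unfold Spec_common_tokens_in_order; infer_instance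

-- ===== CLAIM (what is proved, stated in full; the proofs are below) =====
def Claim_equal_common_tokens_in_order : Prop := ∀ (token_lists : List (List String)), Dom_common_tokens_in_order token_lists → Spec_common_tokens_in_order token_lists (common_tokens_in_order token_lists)

-- ===== LEMMAS AND PROOFS =====

-- ===== VERDICT (by name: the statement is the Claim_ definition above) =====
-- membership in the cumulative intersection = membership in the seed and in every tail list
theorem pv_mem_foldl_inter (rest : List (List String)) (s : PySem.Set String) (x : String) :
    x ∈ rest.foldl (fun commons tokens => PySem.Set.inter commons (PySem.Set.ofList tokens)) s ↔
      x ∈ s ∧ ∀ l ∈ rest, x ∈ l := by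
  induction rest generalizing s with
  | nil => simp
  | cons l rest ih =>
    simp [List.foldl_cons, ih, PySem.Set.mem_inter, PySem.Set.mem_ofList, and_assoc]

theorem common_tokens_in_order_spec : Claim_equal_common_tokens_in_order := by
  intro token_lists _
  unfold Spec_common_tokens_in_order
  match token_lists with
  | [] => rfl
  | first :: rest =>
    simp only [common_tokens_in_order, common_tokens_in_order_alt]
    refine (List.filter_congr ?_).symm
    intro t ht
    rw [Bool.eq_iff_iff]
    simp [pv_mem_foldl_inter, PySem.Set.mem_ofList, ht, List.all_eq_true]
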